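-- pv_equiv track=rewrite | github.com/Hetharsi/poker | poker_rules.py | isColourFlush
-- ===== SOURCE A (Python) =====
-- def isColourFlush(hand):
--     is_colour_flush = False
--     hand = list(map (lambda x: x[0], hand))
--     myTuple = ()
--     setHand = sorted(list(set(hand)))
--     for i in setHand:
--         myTuple += ((i, hand.count(i)),)
--     for x in myTuple:
--         if x[1] > 4: is_colour_flush = True
--     return (is_colour_flush)
-- ===== SOURCE B (Python) =====
-- def isColourFlush(hand):
--     # Sort the suits; a suit occurs more than 4 times iff some sorted slot
--     # equals the slot 4 positions later (equal suits are contiguous when sorted).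
--     suits = sorted(card[0] for card in hand)
--     return any(suits[i] == suits[i + 4] for i in range(len(suits) - 4))
-- ===== Notes on version B (the rewrite author's own statement) =====
-- stated objective: alternative
-- what changed: Replaces A's distinct-set/sort/per-suit hand.count pipeline by sort-then-scan: sort all suits and test whether any element equals the element 4 positions later (in a sorted list a suit has count > 4 iff two equal elements are 4 apart).
import Mathlib
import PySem

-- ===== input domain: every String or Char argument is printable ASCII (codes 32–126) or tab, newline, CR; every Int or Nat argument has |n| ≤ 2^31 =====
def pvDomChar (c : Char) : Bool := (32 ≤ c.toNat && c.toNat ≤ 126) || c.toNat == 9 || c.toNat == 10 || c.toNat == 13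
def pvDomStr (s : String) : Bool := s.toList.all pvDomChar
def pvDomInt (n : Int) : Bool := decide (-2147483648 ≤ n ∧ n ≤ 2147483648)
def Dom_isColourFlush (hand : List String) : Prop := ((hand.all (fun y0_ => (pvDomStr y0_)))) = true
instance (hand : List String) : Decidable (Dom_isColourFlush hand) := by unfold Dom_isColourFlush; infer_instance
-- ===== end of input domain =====

-- B replaces A's distinct-set + per-suit count pipeline by sort-then-scan:
-- sort all suits and test whether any element equals the one 4 positions later.

-- ===== PORT A =====
def isColourFlush (hand : List String) : Bool :=
  let h := hand.map (fun x => (PySem.Str.pyGet? x 0).getD ' ')   -- x[0]; total via getD, exact under Pre_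
  let setHand := PySem.List.sorted (PySem.Set.ofList h) (fun x => x) false
  let myTuple := setHand.foldl (fun acc i => acc ++ [(i, PySem.List.count h i)]) []
  myTuple.foldl (fun b x => if x.2 > 4 then true else b) false

-- ===== PORT B =====
def isColourFlush_alt (hand : List String) : Bool :=
  let suits := PySem.List.sorted (hand.map (fun card => (PySem.Str.pyGet? card 0).getD ' ')) (fun x => x) false
  (PySem.List.pyRange 0 ((suits.length : Int) - 4) 1).any
    (fun i => PySem.List.pyGet? suits i == PySem.List.pyGet? suits (i + 4))

-- ===== PRECONDITION & SPEC =====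
-- Pre_ excludes exactly the hands containing an empty string: there Python A (and B) raises IndexError at card[0].
def Pre_isColourFlush (hand : List String) : Prop := ∀ s ∈ hand, s ≠ ""
instance (hand : List String) : Decidable (Pre_isColourFlush hand) := by unfold Pre_isColourFlush; infer_instance
def pvWitness_isColourFlush : List String := ["H2", "H7", "S3"]
def Spec_isColourFlush (hand : List String) (out : Bool) : Prop := out = isColourFlush_alt hand
instance (hand : List String) (out : Bool) : Decidable (Spec_isColourFlush hand out) := by unfold Spec_isColourFlush; infer_instance

-- ===== CLAIM (what is proved, stated in full; the proofs are below) =====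
def Claim_equal_isColourFlush : Prop := ∀ (hand : List String), Dom_isColourFlush hand → Pre_isColourFlush hand → Spec_isColourFlush hand (isColourFlush hand)

-- ===== LEMMAS AND PROOFS =====

-- A's final loop is an 'any (count > 4)'.
theorem foldl_if_gt4 (l : List (Char × Nat)) (b : Bool) :
    l.foldl (fun b x => if x.2 > 4 then true else b) b = (b || l.any (fun x => decide (x.2 > 4))) := by
  induction l generalizing b with
  | nil => simp
  | cons y t ih =>
    simp only [List.foldl_cons, List.any_cons, ih]
    by_cases hy : y.2 > 4 <;> simp [hy]

-- In a sorted list whose elements are all ≥ x, the first k elements are x when count x ≥ k.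
theorem take_eq_replicate_of_sorted (t : List Char) (x : Char) (k : Nat)
    (hp : t.Pairwise (· ≤ ·)) (hge : ∀ z ∈ t, x ≤ z) (hc : k ≤ t.count x) :
    t.take k = List.replicate k x := by
  induction t generalizing k with
  | nil =>
    simp at hc; simp [hc]
  | cons z t' ih =>
    cases k with
    | zero => simp
    | succ k' =>
      have hzx : z = x := by
        by_contra hne
        have hxz : x ≤ z := hge z (by simp)
        have hmem : x ∈ t' := by
          have hcz : (z :: t').count x = t'.count x := by
            rw [List.count_cons]
            simp [show ¬ (z == x) = true by simp [hne]]
          have : 0 < t'.count x := by omega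
          exact List.count_pos_iff.mp this
        have hzle : z ≤ x := (List.pairwise_cons.mp hp).1 x hmem
        exact hne (le_antisymm hzle hxz)
      subst hzx
      have hc' : k' ≤ t'.count z := by
        have h := List.count_cons_self (a := z) (l := t')
        omega
      have hih := ih k' (List.pairwise_cons.mp hp).2
        (fun w hw => hge w (List.mem_cons_of_mem _ hw)) hc'
      simp [List.replicate_succ, hih]

-- In a sorted list, count x ≥ 5 yields two occurrences of x four slots apart.
theorem exists_gap4_of_count (t : List Char) (x : Char)
    (hp : t.Pairwise (· ≤ ·)) (hc : 5 ≤ t.count x) :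
    ∃ i : Nat, i + 4 < t.length ∧ t[i]? = some x ∧ t[i + 4]? = some x := by
  induction t with
  | nil => simp at hc
  | cons z t' ih =>
    by_cases hzx : z = x
    · subst hzx
      have hc' : 4 ≤ t'.count z := by
        have h := List.count_cons_self (a := z) (l := t')
        omega
      have htake : t'.take 4 = List.replicate 4 z :=
        take_eq_replicate_of_sorted t' z 4 (List.pairwise_cons.mp hp).2
          (fun w hw => (List.pairwise_cons.mp hp).1 w hw) hc'
      have hlen : 4 ≤ t'.length := by
        have hlt := congrArg List.length htake
        simp [List.length_take] at hlt
        omega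
      refine ⟨0, by simp; omega, by simp, ?_⟩
      have h3 : t'[3]? = (t'.take 4)[3]? := by
        rw [List.getElem?_take]
        simp
      simp only [List.getElem?_cons_succ]
      rw [h3, htake]
      simp
    · have hc' : 5 ≤ t'.count x := by
        rw [List.count_cons] at hc
        simp [hzx] at hc
        omega
      obtain ⟨i, hi, h1, h2⟩ := ih (List.pairwise_cons.mp hp).2 hc'
      exact ⟨i + 1, by simp; omega, by simpa using h1, by simpa using h2⟩

-- Conversely, two equal elements four slots apart in a sorted list give count ≥ 5.
theorem count_of_gap4 (l : List Char) (x : Char) (i : Nat)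
    (hp : l.Pairwise (· ≤ ·)) (hi : i + 4 < l.length)
    (h1 : l[i]? = some x) (h2 : l[i + 4]? = some x) :
    5 ≤ l.count x := by
  have hmono : ∀ p q : Nat, (hpq : p ≤ q) → (hq : q < l.length) → l[p]'(by omega) ≤ l[q]'hq := by
    intro p q hpq hq
    rcases Nat.lt_or_ge p q with h | h
    · exact List.pairwise_iff_getElem.mp hp p q (by omega) hq h
    · have : p = q := by omega
      subst this; exact le_refl _
  obtain ⟨_, hx1⟩ := List.getElem?_eq_some_iff.mp h1
  obtain ⟨_, hx2⟩ := List.getElem?_eq_some_iff.mp h2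
  have hall : (l.drop i).take 5 = List.replicate 5 x := by
    rw [List.eq_replicate_iff]
    refine ⟨by simp [List.length_take, List.length_drop]; omega, ?_⟩
    intro b hb
    obtain ⟨j, hj, hbj⟩ := List.mem_iff_getElem.mp hb
    have hjlen : j < 5 := by
      simp [List.length_take, List.length_drop] at hj
      omega
    have hbj' : b = l[i + j]'(by omega) := by
      rw [← hbj, List.getElem_take, List.getElem_drop]
    have ha : x ≤ l[i + j]'(by omega) := by
      rw [← hx1]; exact hmono i (i + j) (by omega) (by omega)
    have hb2 : l[i + j]'(by omega) ≤ x := by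
      rw [← hx2]; exact hmono (i + j) (i + 4) (by omega) hi
    rw [hbj']; exact le_antisymm hb2 ha
  have hsub : List.Sublist ((l.drop i).take 5) l :=
    (List.take_sublist _ _).trans (List.drop_sublist _ _)
  have hcl := hsub.count_le x
  rw [hall] at hcl
  simp at hcl
  omega

-- A = true ↔ some suit has count > 4.
theorem lemA (hand : List String) :
    isColourFlush hand = true ↔
      ∃ x ∈ hand.map (fun s => (PySem.Str.pyGet? s 0).getD ' '),
        4 < (hand.map (fun s => (PySem.Str.pyGet? s 0).getD ' ')).count x := by
  unfold isColourFlush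
  simp only
  set h := hand.map (fun s => (PySem.Str.pyGet? s 0).getD ' ') with hh
  rw [PySem.List.foldl_append_singleton_eq_map, foldl_if_gt4]
  simp only [Bool.false_or, List.nil_append, List.any_map]
  rw [List.Perm.any_eq (PySem.List.sorted_perm _ _ _)]
  simp only [List.any_eq_true]
  constructor
  · rintro ⟨x, hx, hgt⟩
    exact ⟨x, (PySem.Set.mem_ofList _ _).mp hx, by simpa [PySem.List.count_eq] using hgt⟩
  · rintro ⟨x, hx, hgt⟩
    exact ⟨x, (PySem.Set.mem_ofList _ _).mpr hx, by simpa [PySem.List.count_eq] using hgt⟩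

-- B = true ↔ two equal sorted suits four slots apart.
theorem lemB (hand : List String) :
    isColourFlush_alt hand = true ↔
      ∃ i : Nat, i + 4 <
          (PySem.List.sorted (hand.map (fun s => (PySem.Str.pyGet? s 0).getD ' ')) (fun x => x) false).length ∧
        (PySem.List.sorted (hand.map (fun s => (PySem.Str.pyGet? s 0).getD ' ')) (fun x => x) false)[i]? =
        (PySem.List.sorted (hand.map (fun s => (PySem.Str.pyGet? s 0).getD ' ')) (fun x => x) false)[i + 4]? := by
  unfold isColourFlush_alt
  simp only
  set l := PySem.List.sorted (hand.map (fun s => (PySem.Str.pyGet? s 0).getD ' ')) (fun x => x) false with hl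
  simp only [List.any_eq_true, PySem.List.mem_pyRange_one]
  constructor
  · rintro ⟨i, ⟨h0, hlt⟩, heq⟩
    refine ⟨i.toNat, by omega, ?_⟩
    have h1 : PySem.List.pyGet? l i = l[i.toNat]? := PySem.List.pyGet?_of_nonneg l h0
    have h2 : PySem.List.pyGet? l (i + 4) = l[i.toNat + 4]? := by
      rw [PySem.List.pyGet?_of_nonneg l (by omega : (0:Int) ≤ i + 4)]
      congr 1
      omega
    have hd := of_decide_eq_true (by simpa using heq)
    rw [h1, h2] at hd
    exact hd
  · rintro ⟨i, hi, heq⟩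
    refine ⟨(i : Int), ⟨by omega, by omega⟩, ?_⟩
    have h1 : PySem.List.pyGet? l (i : Int) = l[i]? := by
      rw [PySem.List.pyGet?_of_nonneg l (by omega : (0:Int) ≤ (i:Int))]
      congr 1
    have h2 : PySem.List.pyGet? l ((i : Int) + 4) = l[i + 4]? := by
      rw [PySem.List.pyGet?_of_nonneg l (by omega : (0:Int) ≤ (i:Int) + 4)]
      congr 1
    simp [h1, h2, heq]

theorem isColourFlush_key (hand : List String) :
    isColourFlush hand = isColourFlush_alt hand := by
  rw [Bool.eq_iff_iff, lemA, lemB]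
  set h := hand.map (fun s => (PySem.Str.pyGet? s 0).getD ' ') with hh
  set l := PySem.List.sorted h (fun x => x) false with hl
  have hperm : l.Perm h := PySem.List.sorted_perm _ _ _
  have hcount : ∀ x, l.count x = h.count x := fun x => hperm.count_eq x
  have hpair : l.Pairwise (· ≤ ·) := by
    have hsp := PySem.List.sorted_pairwise h (fun x => x)
    simpa using hsp
  constructor
  · rintro ⟨x, hx, hgt⟩
    obtain ⟨i, hi, h1, h2⟩ := exists_gap4_of_count l x hpair (by have := hcount x; omega)
    exact ⟨i, hi, by rw [h1, h2]⟩
  · rintro ⟨i, hi, heq⟩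
    obtain ⟨x, hix⟩ : ∃ x, l[i]? = some x := ⟨l[i]'(by omega), List.getElem?_eq_getElem _⟩
    have hc : 5 ≤ l.count x := count_of_gap4 l x i hpair hi hix (by rw [← heq]; exact hix)
    have hxmem : x ∈ h := hperm.mem_iff.mp (List.mem_of_getElem? hix)
    exact ⟨x, hxmem, by have := hcount x; omega⟩

-- ===== VERDICT (by name: the statement is the Claim_ definition above) =====
theorem isColourFlush_spec : Claim_equal_isColourFlush := by
  intro hand _ _
  unfold Spec_isColourFlush
  exact isColourFlush_key hand
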